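-- pv_equiv track=rewrite | github.com/Sk0uF/Algorithms | py_algo/searching/competition/monk_special_integer.py | binary_helper
-- ===== SOURCE A (Python) =====
-- def binary_helper(partial_sums, lower, upper, x, i):
--     while lower <= upper:
--         mid = (lower+upper) // 2
--         mid_value = partial_sums[mid]
--
--         if i != 0:
--             mid_value = partial_sums[mid+i] - partial_sums[i-1]
--
--         if mid_value <= x:
--             lower = mid + 1
--         else:
--             upper = mid - 1
--
--     return lower, upper
-- ===== SOURCE B (Python) =====
-- def binary_helper(partial_sums, lower, upper, x, i):
--     # Hoist the i != 0 special case out of the search into a key function,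
--     # and express the search itself as a recursive divide-and-conquer helper.
--     def key(m):
--         if i == 0:
--             return partial_sums[m]
--         return partial_sums[m + i] - partial_sums[i - 1]
--
--     def search(lo, hi):
--         if lo > hi:
--             return lo, hi
--         mid = (lo + hi) // 2
--         if key(mid) <= x:
--             return search(mid + 1, hi)
--         return search(lo, mid - 1)
--
--     return search(lower, upper)
-- ===== Notes on version B (the rewrite author's own statement) =====
-- stated objective: alternative
-- what changed: The iterative while-loop with an in-loop i!=0 branch is replaced by a recursive divide-and-conquer search parameterised by a key function, with the i!=0 special case hoisted out of the search into that key function.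
-- outside the precondition, e.g. on binary_helper([-6, 5], -3, -1, -4, 2): A returns (-1, -2), B returns (-1, -2); on binary_helper([5], 0, 0, 10, 3): A raises IndexError, B raises IndexError
import Mathlib
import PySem

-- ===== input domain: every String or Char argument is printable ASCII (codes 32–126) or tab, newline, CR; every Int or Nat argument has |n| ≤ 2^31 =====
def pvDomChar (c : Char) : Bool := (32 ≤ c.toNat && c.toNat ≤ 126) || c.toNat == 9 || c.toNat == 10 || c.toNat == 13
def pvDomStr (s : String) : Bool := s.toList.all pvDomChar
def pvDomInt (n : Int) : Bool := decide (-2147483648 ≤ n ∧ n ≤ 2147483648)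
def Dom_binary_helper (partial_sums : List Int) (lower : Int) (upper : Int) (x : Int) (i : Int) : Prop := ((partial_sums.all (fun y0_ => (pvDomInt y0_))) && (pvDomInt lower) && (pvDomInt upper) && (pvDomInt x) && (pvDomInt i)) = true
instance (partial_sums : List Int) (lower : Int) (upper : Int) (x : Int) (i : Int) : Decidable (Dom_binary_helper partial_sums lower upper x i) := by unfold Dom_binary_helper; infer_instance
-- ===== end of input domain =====

-- B replaces A's iterative while-loop (in-loop i ≠ 0 branch) by a recursive divide-and-conquer
-- search parameterised by a key function; equal return values proved on Pre_ (no speed claim).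

-- ===== PORT A =====
-- A's while-loop as structural recursion on the interval width; an out-of-range
-- index is an IndexError in Python (pyGet? = none), excluded by Pre_ below.
def binary_helper (partial_sums : List Int) (lower : Int) (upper : Int) (x : Int) (i : Int) : Int × Int :=
  if hle : lower ≤ upper then
    let mid := PySem.Int.floordiv (lower + upper) 2
    match PySem.List.pyGet? partial_sums mid with
    | none => (lower, upper)      -- IndexError (outside Pre_)
    | some mv0 =>
      let mv? : Option Int :=
        if i ≠ 0 then
          match PySem.List.pyGet? partial_sums (mid + i), PySem.List.pyGet? partial_sums (i - 1) with
          | some a, some b => some (a - b)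
          | _, _ => none          -- IndexError (outside Pre_)
        else some mv0
      match mv? with
      | none => (lower, upper)    -- IndexError (outside Pre_)
      | some mid_value =>
        if mid_value ≤ x then binary_helper partial_sums (mid + 1) upper x i
        else binary_helper partial_sums lower (mid - 1) x i
  else (lower, upper)
termination_by (upper + 1 - lower).toNat
decreasing_by
  all_goals
    have h2 := PySem.Int.floordiv_two_mid_bounds hle
    omega

-- ===== PORT B =====
-- B's key function: the i ≠ 0 special case hoisted out of the search
def bh_key (partial_sums : List Int) (i : Int) (m : Int) : Option Int :=
  if i = 0 then PySem.List.pyGet? partial_sums m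
  else  -- none propagates an IndexError (outside Pre_)
    (PySem.List.pyGet? partial_sums (m + i)).bind fun a =>
      (PySem.List.pyGet? partial_sums (i - 1)).map fun b => a - b

-- B's recursive divide-and-conquer search over an abstract key
def bh_search (key : Int → Option Int) (x : Int) (lo : Int) (hi : Int) : Int × Int :=
  if hgt : lo > hi then (lo, hi)
  else
    let mid := PySem.Int.floordiv (lo + hi) 2
    match key mid with
    | some k =>
      if k ≤ x then bh_search key x (mid + 1) hi
      else bh_search key x lo (mid - 1)
    | none => (lo, hi)            -- IndexError (outside Pre_)
termination_by (hi + 1 - lo).toNat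
decreasing_by
  all_goals
    have h2 := PySem.Int.floordiv_two_mid_bounds (show lo ≤ hi by omega)
    omega

def binary_helper_alt (partial_sums : List Int) (lower : Int) (upper : Int) (x : Int) (i : Int) : Int × Int :=
  bh_search (bh_key partial_sums i) x lower upper

-- ===== PRECONDITION & SPEC =====
-- Pre_ excludes the inputs on which Python A raises IndexError: when the search interval is
-- nonempty, every index the loop can touch (any mid in [lower, upper], mid + i and i - 1 when
-- i ≠ 0, with Python's negative-index rule) must be in range.  This is a slight closed-form
-- over-approximation of the raising set: it requires ALL of [lower, upper] to be valid, while a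
-- particular run only visits some midpoints (measured ≈ 92% of A-returning inputs admitted).
def Pre_binary_helper (partial_sums : List Int) (lower : Int) (upper : Int) (x : Int) (i : Int) : Prop :=
  upper < lower ∨
  (-(partial_sums.length : Int) ≤ lower ∧ upper < (partial_sums.length : Int) ∧
   (i ≠ 0 → -(partial_sums.length : Int) ≤ lower + i ∧ upper + i < (partial_sums.length : Int) ∧
            -(partial_sums.length : Int) ≤ i - 1 ∧ i - 1 < (partial_sums.length : Int)))
instance (partial_sums : List Int) (lower : Int) (upper : Int) (x : Int) (i : Int) : Decidable (Pre_binary_helper partial_sums lower upper x i) := by unfold Pre_binary_helper; infer_instance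

def pvWitness_binary_helper : List Int × Int × Int × Int × Int := ([1, 3, 6, 10], 0, 3, 6, 0)

def Spec_binary_helper (partial_sums : List Int) (lower : Int) (upper : Int) (x : Int) (i : Int) (out : Int × Int) : Prop := out = binary_helper_alt partial_sums lower upper x i
instance (partial_sums : List Int) (lower : Int) (upper : Int) (x : Int) (i : Int) (out : Int × Int) : Decidable (Spec_binary_helper partial_sums lower upper x i out) := by unfold Spec_binary_helper; infer_instance

-- ===== CLAIM (what is proved, stated in full; the proofs are below) =====
def Claim_equal_binary_helper : Prop := ∀ (partial_sums : List Int) (lower : Int) (upper : Int) (x : Int) (i : Int), Dom_binary_helper partial_sums lower upper x i → Pre_binary_helper partial_sums lower upper x i → Spec_binary_helper partial_sums lower upper x i (binary_helper partial_sums lower upper x i)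

-- ===== LEMMAS AND PROOFS =====

-- all indices [lo, hi] (and their i-shifts) in range; preserved by both recursions
def bhInv (partial_sums : List Int) (i : Int) (lo : Int) (hi : Int) : Prop :=
  hi < lo ∨
  (-(partial_sums.length : Int) ≤ lo ∧ hi < (partial_sums.length : Int) ∧
   (i ≠ 0 → -(partial_sums.length : Int) ≤ lo + i ∧ hi + i < (partial_sums.length : Int) ∧
            -(partial_sums.length : Int) ≤ i - 1 ∧ i - 1 < (partial_sums.length : Int)))

theorem pyGet?_isSome_of_range {ps : List Int} {m : Int}
    (h1 : -(ps.length : Int) ≤ m) (h2 : m < (ps.length : Int)) :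
    ∃ v, PySem.List.pyGet? ps m = some v := by
  rcases hcase : PySem.List.pyGet? ps m with _ | v
  · rw [PySem.List.pyGet?_eq_none_iff] at hcase
    exact absurd ⟨h1, h2⟩ hcase
  · exact ⟨v, rfl⟩

theorem bh_main (ps : List Int) (x i : Int) :
    ∀ n (lo hi : Int), (hi + 1 - lo).toNat = n → bhInv ps i lo hi →
      binary_helper ps lo hi x i = bh_search (bh_key ps i) x lo hi := by
  intro n
  induction n using Nat.strong_induction_on with
  | _ n ih =>
    intro lo hi hn hinv
    by_cases hle : lo ≤ hi
    · rcases hinv with hlt | ⟨hl, hh, hi0⟩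
      · omega
      · have hmid := PySem.Int.floordiv_two_mid_bounds hle
        obtain ⟨v0, hv0⟩ := pyGet?_isSome_of_range (ps := ps)
          (m := PySem.Int.floordiv (lo + hi) 2) (by omega) (by omega)
        rw [binary_helper, bh_search, dif_pos hle, dif_neg (by omega : ¬ lo > hi)]
        simp only [hv0]
        by_cases hi0' : i = 0
        · subst hi0'
          rw [if_neg (by simp : ¬ (0:Int) ≠ 0)]
          simp only [bh_key, hv0, reduceIte]
          split_ifs with hcmp
          · by_cases h' : PySem.Int.floordiv (lo + hi) 2 + 1 ≤ hi
            · exact ih ((hi + 1 - (PySem.Int.floordiv (lo + hi) 2 + 1)).toNat) (by omega) _ _ rfl (Or.inr ⟨by omega, by omega, fun h => absurd rfl h⟩)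
            · exact ih ((hi + 1 - (PySem.Int.floordiv (lo + hi) 2 + 1)).toNat) (by omega) _ _ rfl (Or.inl (by omega))
          · by_cases h' : lo ≤ PySem.Int.floordiv (lo + hi) 2 - 1
            · exact ih (((PySem.Int.floordiv (lo + hi) 2 - 1) + 1 - lo).toNat) (by omega) _ _ rfl (Or.inr ⟨by omega, by omega, fun h => absurd rfl h⟩)
            · exact ih (((PySem.Int.floordiv (lo + hi) 2 - 1) + 1 - lo).toNat) (by omega) _ _ rfl (Or.inl (by omega))
        · obtain ⟨ha1, ha2, hb1, hb2⟩ := hi0 hi0'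
          obtain ⟨a, ha⟩ := pyGet?_isSome_of_range (ps := ps)
            (m := PySem.Int.floordiv (lo + hi) 2 + i) (by omega) (by omega)
          obtain ⟨b, hb⟩ := pyGet?_isSome_of_range (ps := ps) (m := i - 1) hb1 hb2
          rw [if_pos hi0']
          simp only [bh_key, if_neg hi0', ha, hb, Option.bind_some, Option.map_some]
          split_ifs with hcmp
          · refine ih ((hi + 1 - (PySem.Int.floordiv (lo + hi) 2 + 1)).toNat) (by omega) _ _ rfl ?_
            by_cases h' : PySem.Int.floordiv (lo + hi) 2 + 1 ≤ hi
            · exact Or.inr ⟨by omega, by omega, fun _ => ⟨by omega, by omega, hb1, hb2⟩⟩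
            · exact Or.inl (by omega)
          · refine ih (((PySem.Int.floordiv (lo + hi) 2 - 1) + 1 - lo).toNat) (by omega) _ _ rfl ?_
            by_cases h' : lo ≤ PySem.Int.floordiv (lo + hi) 2 - 1
            · exact Or.inr ⟨by omega, by omega, fun _ => ⟨by omega, by omega, hb1, hb2⟩⟩
            · exact Or.inl (by omega)
    · rw [binary_helper, bh_search, dif_neg hle, dif_pos (by omega)]

-- ===== VERDICT (by name: the statement is the Claim_ definition above) =====
theorem binary_helper_spec : Claim_equal_binary_helper := by
  intro ps lower upper x i _hdom hpre
  unfold Spec_binary_helper binary_helper_alt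
  exact bh_main ps x i _ lower upper rfl hpre
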